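-- pv_equiv track=rewrite | github.com/Mistic1989/projects | Python homework/KT/kt4/exam.py | create_dictionary_from_directed_string_pairs
-- ===== SOURCE A (Python) =====
-- def create_dictionary_from_directed_string_pairs(pairs: list) -> dict:
--     """
--     Create dictionary from directed string pairs.
--
--     One pair consists of two strings and "direction" symbol ("<" or ">").
--     The key is the string which is on the "larger" side,
--     the value is the string which is on the "smaller" side.
--
--     For example:
--     ab>cd => "ab" is the key, "cd" is the value
--     kl<mn => "mn" is the key, "kl" is the value
--
--     The input consists of list of such strings.
--     The output is a dictionary, where values are lists.
--     Each key cannot contain duplicate elements.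
--     The order of the elements in the values should be
--     the same as they appear in the input list.
--
--     create_dictionary_from_directed_string_pairs([]) => {}
--
--     create_dictionary_from_directed_string_pairs(["a>b", "a>c"]) =>
--     {"a": ["b", "c"]}
--
--     create_dictionary_from_directed_string_pairs(["a>b", "a<b"]) =>
--     {"a": ["b"], "b": ["a"]}
--
--     create_dictionary_from_directed_string_pairs(["1>1", "1>2", "1>1"]) =>
--     {"1": ["1", "2"]}
--     """
--     result = {}
--     for i in pairs:
--         if ">" in i:
--             splitted = i.split(">")
--             if splitted[0] not in result:
--                 result[splitted[0]] = []
--             if splitted[1] not in result[splitted[0]]: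
--                 result.setdefault(splitted[0], []).append(splitted[1])
--         if "<" in i:
--             splitted2 = i.split("<")
--             if splitted2[1] not in result:
--                 result[splitted2[1]] = []
--             if splitted2[0] not in result[splitted2[1]]:
--                 result.setdefault(splitted2[1], []).append(splitted2[0])
--     return result
-- ===== SOURCE B (Python) =====
-- def create_dictionary_from_directed_string_pairs(pairs: list) -> dict:
--     # Pass 1: flatten the input into a list of (key, value) edges.
--     edges = []
--     for i in pairs:
--         if ">" in i:
--             sp = i.split(">")
--             edges.append((sp[0], sp[1]))
--         if "<" in i:
--             sp = i.split("<")
--             edges.append((sp[1], sp[0]))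
--     # Pass 2: group by key (first-occurrence order), dedup values in order.
--     keys = list(dict.fromkeys(k for k, _ in edges))
--     return {k: list(dict.fromkeys(v for k2, v in edges if k2 == k))
--             for k in keys}
-- ===== Notes on version B (the rewrite author's own statement) =====
-- stated objective: alternative
-- what changed: A builds the dict incrementally with a membership test before every append; B first flattens the input into a plain list of (key,value) edges with no dict at all, then reconstructs the result by grouping: keys in first-occurrence order via dict.fromkeys, each value list obtained by filtering the edge list and deduping once.
import Mathlib
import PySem

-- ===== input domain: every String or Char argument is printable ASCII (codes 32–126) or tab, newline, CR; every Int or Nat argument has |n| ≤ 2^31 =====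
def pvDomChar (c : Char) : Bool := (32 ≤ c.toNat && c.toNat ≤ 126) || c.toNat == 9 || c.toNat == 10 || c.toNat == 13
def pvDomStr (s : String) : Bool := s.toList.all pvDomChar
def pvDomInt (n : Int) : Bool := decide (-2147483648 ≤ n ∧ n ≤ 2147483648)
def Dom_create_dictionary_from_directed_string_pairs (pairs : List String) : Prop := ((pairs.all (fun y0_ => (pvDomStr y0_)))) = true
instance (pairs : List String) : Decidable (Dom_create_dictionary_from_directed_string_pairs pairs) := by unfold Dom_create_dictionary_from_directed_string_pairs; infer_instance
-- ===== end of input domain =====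

-- B replaces A's incremental dict build (membership test before every append) by a flatten-to-edges
-- pass with no dict, followed by a grouping pass (keys in first-occurrence order, values deduped once).

-- ===== PORT A =====
-- one loop iteration of A: both delimiters handled independently, membership check before each append
def pvStepA (d : PySem.Dict String (List String)) (i : String) : PySem.Dict String (List String) :=
  let d1 :=
    if PySem.Str.isIn ">" i then
      let sp := (PySem.Str.split? i ">").getD []   -- sep is the literal ">", never "": split? is some here
      let k := PySem.List.pyGetD sp 0 ""           -- splitted[0] (in range: split yields ≥ 2 parts)
      let v := PySem.List.pyGetD sp 1 ""           -- splitted[1]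
      let d' := if d.contains k then d else d.insert k []
      if v ∈ d'.getD k [] then d' else d'.modify k [] (· ++ [v])  -- setdefault(k,[]).append(v)
    else d
  if PySem.Str.isIn "<" i then
    let sp := (PySem.Str.split? i "<").getD []
    let v := PySem.List.pyGetD sp 0 ""
    let k := PySem.List.pyGetD sp 1 ""
    let d' := if d1.contains k then d1 else d1.insert k []
    if v ∈ d'.getD k [] then d' else d'.modify k [] (· ++ [v])
  else d1

def create_dictionary_from_directed_string_pairs (pairs : List String) : List (String × List String) :=
  (pairs.foldl pvStepA PySem.Dict.empty).items

-- ===== PORT B =====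
-- B pass 1: the (key, value) edges contributed by one input string (no dict involved)
def pvEdges (i : String) : List (String × String) :=
  (if PySem.Str.isIn ">" i then
     let sp := (PySem.Str.split? i ">").getD []
     [(PySem.List.pyGetD sp 0 "", PySem.List.pyGetD sp 1 "")]
   else []) ++
  (if PySem.Str.isIn "<" i then
     let sp := (PySem.Str.split? i "<").getD []
     [(PySem.List.pyGetD sp 1 "", PySem.List.pyGetD sp 0 "")]
   else [])

-- B pass 2: group the flat edge list by key; dict.fromkeys = PySem.List.dedup
def create_dictionary_from_directed_string_pairs_alt (pairs : List String) : List (String × List String) :=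
  let edges := pairs.flatMap pvEdges
  let keys := PySem.List.dedup (edges.map Prod.fst)
  keys.map (fun k => (k, PySem.List.dedup ((edges.filter (fun e => e.1 == k)).map Prod.snd)))

-- ===== PRECONDITION & SPEC =====
def Spec_create_dictionary_from_directed_string_pairs (pairs : List String) (out : List (String × List String)) : Prop := out = create_dictionary_from_directed_string_pairs_alt pairs
instance (pairs : List String) (out : List (String × List String)) : Decidable (Spec_create_dictionary_from_directed_string_pairs pairs out) := by unfold Spec_create_dictionary_from_directed_string_pairs; infer_instance

-- ===== CLAIM (what is proved, stated in full; the proofs are below) =====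
def Claim_equal_create_dictionary_from_directed_string_pairs : Prop := ∀ (pairs : List String), Dom_create_dictionary_from_directed_string_pairs pairs → Spec_create_dictionary_from_directed_string_pairs pairs (create_dictionary_from_directed_string_pairs pairs)

-- ===== LEMMAS AND PROOFS =====

-- A's handling of one edge (k, v): create the key if absent, append v if not already present
def pvEdgeStep (d : PySem.Dict String (List String)) (e : String × String) : PySem.Dict String (List String) :=
  let d' := if d.contains e.1 then d else d.insert e.1 []
  if e.2 ∈ d'.getD e.1 [] then d' else d'.modify e.1 [] (· ++ [e.2])

-- the grouped form of the dict after processing an edge list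
def pvSpec (es : List (String × String)) : List (String × List String) :=
  (PySem.List.dedup (es.map Prod.fst)).map
    (fun k => (k, PySem.List.dedup ((es.filter (fun e => e.1 == k)).map Prod.snd)))

def pvD (es : List (String × String)) : PySem.Dict String (List String) := ⟨pvSpec es⟩

theorem pvDedup_append_mem {vs : List String} {v : String} (h : v ∈ vs) :
    PySem.List.dedup (vs ++ [v]) = PySem.List.dedup vs := by
  simp only [PySem.List.dedup, PySem.Set.ofList_append_singleton]
  exact PySem.Set.add_of_mem ((PySem.Set.mem_ofList vs v).mpr h)

theorem pvDedup_append_not_mem {vs : List String} {v : String} (h : v ∉ vs) :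
    PySem.List.dedup (vs ++ [v]) = PySem.List.dedup vs ++ [v] := by
  simp only [PySem.List.dedup, PySem.Set.ofList_append_singleton]
  exact PySem.Set.add_of_not_mem (fun hm => h ((PySem.Set.mem_ofList vs v).mp hm))

theorem pvStepA_eq_foldl (d : PySem.Dict String (List String)) (i : String) :
    pvStepA d i = (pvEdges i).foldl pvEdgeStep d := by
  unfold pvStepA pvEdges pvEdgeStep
  simp only [PySem.Str.isIn]
  by_cases h1 : PySem.Chars.isIn ['>'] i.toList <;> by_cases h2 : PySem.Chars.isIn ['<'] i.toList <;>
    simp [h1, h2]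

theorem pvKeys_pvD (es : List (String × String)) :
    (pvD es).keys = PySem.List.dedup (es.map Prod.fst) := by
  simp only [pvD, pvSpec, PySem.Dict.keys, List.map_map]
  exact List.map_id _

theorem pvValues_of_not_mem {es : List (String × String)} {k : String}
    (h : k ∉ es.map Prod.fst) :
    es.filter (fun e => e.1 == k) = [] := by
  rw [List.filter_eq_nil_iff]
  intro e he hk
  exact h (List.mem_map.mpr ⟨e, he, eq_of_beq hk⟩)

theorem pvFilter_append (es : List (String × String)) (e : String × String) (k : String) :
    (((es ++ [e]).filter (fun x => x.1 == k)).map Prod.snd)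
      = (es.filter (fun x => x.1 == k)).map Prod.snd ++ (if e.1 == k then [e.2] else []) := by
  rw [List.filter_append, List.map_append]
  by_cases h : (e.1 == k) = true <;> simp [h]

-- one edge: A's guarded insert/append on the grouped dict = the grouped dict of the extended edge list
theorem pvEdge_step (es : List (String × String)) (e : String × String) :
    pvEdgeStep (pvD es) e = pvD (es ++ [e]) := by
  have hkeys := pvKeys_pvD es
  have hnd : (pvD es).keys.Nodup := by rw [hkeys]; exact PySem.List.nodup_dedup _
  by_cases hc : e.1 ∈ es.map Prod.fst
  · -- key already present
    have hck : (pvD es).contains e.1 = true := by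
      rw [PySem.Dict.contains_eq_decide_mem_keys, hkeys]
      simp [hc]
    have hmemit : (e.1, PySem.List.dedup ((es.filter (fun x => x.1 == e.1)).map Prod.snd)) ∈ (pvD es).items := by
      show _ ∈ pvSpec es
      exact List.mem_map.mpr ⟨e.1, (PySem.List.mem_dedup _ _).mpr hc, rfl⟩
    have hgd : (pvD es).getD e.1 [] = PySem.List.dedup ((es.filter (fun x => x.1 == e.1)).map Prod.snd) :=
      PySem.Dict.getD_of_mem_items _ hmemit hnd _
    unfold pvEdgeStep
    simp only [hck, if_true, hgd]
    by_cases hv : e.2 ∈ (es.filter (fun x => x.1 == e.1)).map Prod.snd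
    · -- duplicate value: A leaves the dict unchanged; the grouped form also does not change
      rw [if_pos ((PySem.List.mem_dedup _ _).mpr hv)]
      apply PySem.Dict.ext
      show pvSpec es = pvSpec (es ++ [e])
      unfold pvSpec
      rw [List.map_append, List.map_singleton, pvDedup_append_mem hc]
      apply List.map_congr_left
      intro k hk
      rw [pvFilter_append]
      by_cases hek : (e.1 == k) = true
      · have : k = e.1 := (eq_of_beq hek).symm
        subst this
        rw [if_pos hek, pvDedup_append_mem hv]
      · rw [if_neg hek, List.append_nil]
    · -- new value: A appends; the grouped form appends after dedup
      rw [if_neg (fun hm => hv ((PySem.List.mem_dedup _ _).mp hm))]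
      rw [PySem.Dict.modify, hgd]
      apply PySem.Dict.ext
      rw [PySem.Dict.items_insert_of_contains _ _ hck]
      show (pvSpec es).map _ = pvSpec (es ++ [e])
      unfold pvSpec
      rw [List.map_append, List.map_singleton, pvDedup_append_mem hc, List.map_map]
      apply List.map_congr_left
      intro k hk
      rw [pvFilter_append]
      by_cases hek : (e.1 == k) = true
      · have hke : e.1 = k := eq_of_beq hek
        subst hke
        simp only [Function.comp_apply, beq_self_eq_true, if_true]
        rw [pvDedup_append_not_mem hv]
      · have hne : k ≠ e.1 := fun h => hek (by simp [h])
        simp [hek, hne]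
  · -- fresh key: both sides append a new entry (e.1, [e.2]) at the end
    have hck : (pvD es).contains e.1 = false := by
      rw [PySem.Dict.contains_eq_decide_mem_keys, hkeys]
      simp [hc]
    unfold pvEdgeStep
    simp only [hck, Bool.false_eq_true, if_false]
    rw [if_neg (by rw [PySem.Dict.getD_insert_self]; exact List.not_mem_nil)]
    rw [PySem.Dict.modify, PySem.Dict.getD_insert_self, PySem.Dict.insert_insert_self]
    apply PySem.Dict.ext
    rw [PySem.Dict.items_insert_of_not_contains _ _ hck]
    show pvSpec es ++ [(e.1, [e.2])] = pvSpec (es ++ [e])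
    unfold pvSpec
    rw [List.map_append, List.map_singleton, pvDedup_append_not_mem hc, List.map_append]
    congr 1
    · apply List.map_congr_left
      intro k hk
      have hk' : k ∈ es.map Prod.fst := (PySem.List.mem_dedup _ _).mp hk
      have hne : (e.1 == k) = false := by
        rw [beq_eq_false_iff_ne]
        intro h
        exact hc (by rw [h]; exact hk')
      rw [pvFilter_append, hne]
      simp
    · rw [List.map_singleton, pvFilter_append, pvValues_of_not_mem hc]
      simp only [List.map_nil, List.nil_append, beq_self_eq_true, if_true]
      rfl

theorem pvFold (es2 es1 : List (String × String)) :
    es2.foldl pvEdgeStep (pvD es1) = pvD (es1 ++ es2) := by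
  induction es2 generalizing es1 with
  | nil => simp
  | cons e rest ih =>
    simp only [List.foldl_cons]
    rw [pvEdge_step es1 e, ih (es1 ++ [e])]
    simp

theorem pvFoldA_flatMap (pairs : List String) (d : PySem.Dict String (List String)) :
    pairs.foldl pvStepA d = (pairs.flatMap pvEdges).foldl pvEdgeStep d := by
  induction pairs generalizing d with
  | nil => rfl
  | cons i rest ih =>
    simp only [List.foldl_cons, List.flatMap_cons, List.foldl_append]
    rw [pvStepA_eq_foldl, ih]

-- ===== VERDICT (by name: the statement is the Claim_ definition above) =====
theorem create_dictionary_from_directed_string_pairs_spec : Claim_equal_create_dictionary_from_directed_string_pairs := by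
  intro pairs _
  show create_dictionary_from_directed_string_pairs pairs = create_dictionary_from_directed_string_pairs_alt pairs
  unfold create_dictionary_from_directed_string_pairs create_dictionary_from_directed_string_pairs_alt
  have h0 : (PySem.Dict.empty : PySem.Dict String (List String)) = pvD [] := rfl
  rw [pvFoldA_flatMap, h0, pvFold]
  rfl
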